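-- pv_equiv track=rewrite | github.com/Yashu3624/DSA-LEETCODE-GFG | count-asterisks/count-asterisks.py | countAsterisks
-- ===== SOURCE A (Python) =====
-- def countAsterisks(s: str) -> int:
--     res , bar = 0 , 0
--     for i  in range(len(s)):
--         if s[i]=='*' and bar %2==0:
--             res += 1
--         if s[i]=='|':
--             bar += 1
--     return res
-- ===== SOURCE B (Python) =====
-- def countAsterisks(s: str) -> int:
--     return sum(seg.count('*') for i, seg in enumerate(s.split('|')) if i % 2 == 0)
-- ===== Notes on version B (the rewrite author's own statement) =====
-- stated objective: simpler
-- what changed: Replaced the per-character pipe-parity tracking loop with a two-stage decomposition: split the string on the bar separator and sum the asterisk counts of the even-indexed segments (split/count run in C, so it also measured faster).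
import Mathlib
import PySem

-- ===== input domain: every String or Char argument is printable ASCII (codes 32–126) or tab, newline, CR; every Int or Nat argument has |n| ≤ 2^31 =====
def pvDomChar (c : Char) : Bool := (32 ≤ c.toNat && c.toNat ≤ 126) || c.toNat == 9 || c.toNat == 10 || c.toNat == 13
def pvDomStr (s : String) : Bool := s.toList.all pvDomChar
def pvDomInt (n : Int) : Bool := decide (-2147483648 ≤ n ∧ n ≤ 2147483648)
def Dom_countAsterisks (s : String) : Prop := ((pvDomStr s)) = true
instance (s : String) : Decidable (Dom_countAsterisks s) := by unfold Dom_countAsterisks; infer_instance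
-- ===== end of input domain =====

-- B replaces A's per-character pipe-parity loop by splitting on '|' and summing the
-- '*' counts of the even-indexed segments (objective: simpler decomposition).

-- ===== PORT A =====
-- A walks the characters once, keeping a result counter and a running count of '|' seen.
def countAsterisks (s : String) : Int :=
  (s.toList.foldl
    (fun st c =>
      ((if c == '*' && st.2 % 2 == 0 then st.1 + 1 else st.1),
       (if c == '|' then st.2 + 1 else st.2)))
    ((0 : Int), (0 : Int))).1

-- ===== PORT B =====
-- s.split('|') is ported as List.splitOn '|' (exact for a one-character separator);
-- seg.count('*') as List.count (exact for a one-character needle).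
def countAsterisks_alt (s : String) : Int :=
  (PySem.List.enumerate (s.toList.splitOn '|')).foldl
    (fun acc p => if p.1 % 2 == 0 then acc + (p.2.count '*' : Int) else acc) 0

-- ===== PRECONDITION & SPEC =====
def Spec_countAsterisks (s : String) (out : Int) : Prop := out = countAsterisks_alt s
instance (s : String) (out : Int) : Decidable (Spec_countAsterisks s out) := by unfold Spec_countAsterisks; infer_instance

-- ===== CLAIM (what is proved, stated in full; the proofs are below) =====
def Claim_equal_countAsterisks : Prop := ∀ (s : String), Dom_countAsterisks s → Spec_countAsterisks s (countAsterisks s)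

-- ===== LEMMAS AND PROOFS =====

-- sum of '*'-counts of the segments at even (flag = true starts at an even index) positions
def pvSegSum : Bool → List (List Char) → Int
  | _, [] => 0
  | true, seg :: r => (seg.count '*' : Int) + pvSegSum false r
  | false, _ :: r => pvSegSum true r

theorem pvParityFlip (b : Int) : (((b + 1) % 2 == 0) : Bool) = !(b % 2 == 0) := by
  rcases Int.emod_two_eq b with h | h
  · have h1 : (b + 1) % 2 = 1 := by omega
    simp [h, h1]
  · have h1 : (b + 1) % 2 = 0 := by omega
    simp [h, h1]

theorem pvSegSum_nil_cons (b : Bool) (r : List (List Char)) :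
    pvSegSum b ([] :: r) = pvSegSum (!b) r := by
  cases b <;> simp [pvSegSum]

theorem pvLoopA_eq (l : List Char) : ∀ (res bar : Int),
    (l.foldl
      (fun st c =>
        ((if c == '*' && st.2 % 2 == 0 then st.1 + 1 else st.1),
         (if c == '|' then st.2 + 1 else st.2)))
      (res, bar)).1
    = res + pvSegSum (bar % 2 == 0) (l.splitOn '|') := by
  induction l with
  | nil =>
    intro res bar
    cases hb : ((bar % 2 == 0) : Bool) <;> simp [List.splitOn_nil, pvSegSum]
  | cons c l ih =>
    intro res bar
    simp only [List.foldl_cons]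
    by_cases hc : c = '|'
    · subst hc
      rw [ih]
      have h1 : ('|' == '*') = false := by decide
      have h2 : ('|' == '|') = true := by decide
      simp only [List.splitOn, List.splitOnP_cons, h1, h2, Bool.false_and, if_true,
        pvSegSum_nil_cons, pvParityFlip, Bool.false_eq_true, if_false]
    · obtain ⟨seg, r, hsr⟩ : ∃ seg r, l.splitOnP (· == '|') = seg :: r := by
        cases h : l.splitOnP (· == '|') with
        | nil => exact absurd h (List.splitOnP_ne_nil _ _)
        | cons a b => exact ⟨a, b, rfl⟩
      rw [ih]
      simp only [List.splitOn, List.splitOnP_cons, hsr]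
      by_cases hs : c = '*'
      · subst hs
        cases hb : ((bar % 2 == 0) : Bool)
        · simp [hb, pvSegSum]
        · simp [hb, pvSegSum]
          ring
      · cases hb : ((bar % 2 == 0) : Bool)
        · simp [hb, hc, pvSegSum]
        · simp [hb, hc, hs, pvSegSum]

theorem pvEnum_eq (segs : List (List Char)) : ∀ (k acc : Int),
    (PySem.List.enumerate segs k).foldl
      (fun acc p => if p.1 % 2 == 0 then acc + (p.2.count '*' : Int) else acc) acc
    = acc + pvSegSum (k % 2 == 0) segs := by
  induction segs with
  | nil => intro k acc; simp [PySem.List.enumerate, pvSegSum]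
  | cons seg r ih =>
    intro k acc
    simp only [PySem.List.enumerate, List.foldl_cons]
    rw [ih, pvParityFlip]
    cases hk : ((k % 2 == 0) : Bool)
    · simp [pvSegSum]
    · simp [pvSegSum]
      ring

-- ===== VERDICT (by name: the statement is the Claim_ definition above) =====
theorem countAsterisks_spec : Claim_equal_countAsterisks := by
  intro s _
  unfold Spec_countAsterisks countAsterisks countAsterisks_alt
  rw [pvLoopA_eq, pvEnum_eq]
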